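-- pv_equiv track=rewrite | github.com/evalops/agent-pm | agent_pm/prd_versions.py | _extract_changed_sections
-- ===== SOURCE A (Python) =====
-- def _extract_changed_sections(diff_lines: list[str]) -> list[str]:
--     """Extract which sections changed (Goals, Requirements, etc.)."""
--     sections = []
--     for line in diff_lines:
--         if line.startswith("+## ") or line.startswith("-## "):
--             section = line[4:].strip()
--             if section not in sections:
--                 sections.append(section)
--     return sections
-- ===== SOURCE B (Python) =====
-- def _extract_changed_sections(diff_lines: list[str]) -> list[str]:
--     """Extract which sections changed (Goals, Requirements, etc.)."""
--     headers = [line[4:].strip() for line in diff_lines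
--                if line.startswith("+## ") or line.startswith("-## ")]
--     out = []
--     while headers:
--         h = headers[0]
--         out.append(h)
--         headers = [x for x in headers[1:] if x != h]
--     return out
-- ===== Notes on version B (the rewrite author's own statement) =====
-- stated objective: alternative
-- what changed: B first collects all changed headers in one comprehension, then deduplicates with no seen-set and no membership test: it repeatedly emits the front header and filters every later occurrence of it out of the remaining list (head-and-purge dedup), whereas A grows an accumulator guarded by a 'not in' scan.
import Mathlib
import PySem

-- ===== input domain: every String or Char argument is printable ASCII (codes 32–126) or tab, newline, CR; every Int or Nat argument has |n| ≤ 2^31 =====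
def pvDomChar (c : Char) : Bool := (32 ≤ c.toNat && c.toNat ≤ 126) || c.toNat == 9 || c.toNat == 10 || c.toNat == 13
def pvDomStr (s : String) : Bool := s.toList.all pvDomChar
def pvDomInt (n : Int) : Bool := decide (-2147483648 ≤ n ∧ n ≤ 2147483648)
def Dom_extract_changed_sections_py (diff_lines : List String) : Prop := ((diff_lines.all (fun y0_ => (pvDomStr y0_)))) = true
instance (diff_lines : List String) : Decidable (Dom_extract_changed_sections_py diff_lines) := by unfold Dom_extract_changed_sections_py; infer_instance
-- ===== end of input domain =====

-- B replaces A's append-if-absent accumulator by a two-stage pass: collect all headers, then head-and-purge dedup (emit front, filter its later occurrences); same value, no membership scan against an accumulator.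

-- ===== PORT A =====
-- Port of A: one fold carrying the accumulated list, appending line[4:].strip() when absent.
def extract_changed_sections_py (diff_lines : List String) : List String :=
  diff_lines.foldl (fun sections line =>
    if PySem.Str.startswith line "+## " || PySem.Str.startswith line "-## " then
      let sec := PySem.Str.strip (PySem.Str.slice line (some 4) none)
      if sec ∈ sections then sections else sections ++ [sec]
    else sections) []

-- ===== PORT B =====
-- B's comprehension: all changed headers, in order.
def pvHeaders (diff_lines : List String) : List String :=
  diff_lines.filterMap (fun line =>
    if PySem.Str.startswith line "+## " || PySem.Str.startswith line "-## " then
      some (PySem.Str.strip (PySem.Str.slice line (some 4) none))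
    else none)

-- B's while loop: emit the front header, purge its later occurrences, repeat on the shrunk list.
def pvHeadPurge : List String → List String
  | [] => []
  | h :: t => h :: pvHeadPurge (t.filter (fun x => x ≠ h))
termination_by hs => hs.length
decreasing_by
  simp
  exact (List.length_filter_le _ _).trans (List.length_attach).le

def extract_changed_sections_py_alt (diff_lines : List String) : List String :=
  pvHeadPurge (pvHeaders diff_lines)

-- ===== PRECONDITION & SPEC =====
def Spec_extract_changed_sections_py (diff_lines : List String) (out : List String) : Prop := out = extract_changed_sections_py_alt diff_lines
instance (diff_lines : List String) (out : List String) : Decidable (Spec_extract_changed_sections_py diff_lines out) := by unfold Spec_extract_changed_sections_py; infer_instance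

-- ===== CLAIM =====
def Claim_equal_extract_changed_sections_py : Prop := ∀ (diff_lines : List String), Dom_extract_changed_sections_py diff_lines → Spec_extract_changed_sections_py diff_lines (extract_changed_sections_py diff_lines)

-- ===== LEMMAS AND PROOFS =====

-- A's interleaved fold equals folding append-if-absent over the filterMapped headers.
theorem foldl_filterMap_addIfAbsent (xs : List String) (acc : List String) :
    xs.foldl (fun sections line =>
      if PySem.Str.startswith line "+## " || PySem.Str.startswith line "-## " then
        let sec := PySem.Str.strip (PySem.Str.slice line (some 4) none)
        if sec ∈ sections then sections else sections ++ [sec]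
      else sections) acc
    = (pvHeaders xs).foldl (fun s x => if x ∈ s then s else s ++ [x]) acc := by
  induction xs generalizing acc with
  | nil => rfl
  | cons x xs ih =>
    simp only [pvHeaders, List.foldl_cons, List.filterMap_cons]
    by_cases h : (PySem.Str.startswith x "+## " || PySem.Str.startswith x "-## ") = true
    · simp only [h, if_pos]
      rw [List.foldl_cons]
      exact ih _
    · rw [Bool.not_eq_true] at h
      simp only [h, Bool.false_eq_true, if_false]
      exact ih acc

@[simp] theorem pvHeadPurge_nil : pvHeadPurge [] = [] := by rw [pvHeadPurge.eq_def]
theorem pvHeadPurge_cons (h : String) (t : List String) :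
    pvHeadPurge (h :: t) = h :: pvHeadPurge (t.filter (fun x => x ≠ h)) := by
  rw [pvHeadPurge.eq_def]

-- Folding append-if-absent from acc equals acc followed by head-and-purge dedup of the not-yet-seen elements.
theorem foldl_addIfAbsent_eq_headPurge (hs : List String) :
    ∀ acc, hs.foldl (fun s x => if x ∈ s then s else s ++ [x]) acc
      = acc ++ pvHeadPurge (hs.filter (fun x => decide (x ∉ acc))) := by
  induction hs with
  | nil => intro acc; simp
  | cons h t ih =>
    intro acc
    by_cases hm : h ∈ acc
    · simpa [hm] using ih acc
    · rw [List.foldl_cons]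
      have hstep : (if h ∈ acc then acc else acc ++ [h]) = acc ++ [h] := if_neg hm
      have hcons : (h :: t).filter (fun x => decide (x ∉ acc))
          = h :: t.filter (fun x => decide (x ∉ acc)) := by simp [hm]
      rw [hstep, ih (acc ++ [h]), hcons, pvHeadPurge_cons]
      have hf : t.filter (fun x => decide (x ∉ acc ++ [h]))
          = (t.filter (fun x => decide (x ∉ acc))).filter (fun x => x ≠ h) := by
        rw [List.filter_filter]
        apply List.filter_congr
        intro x _
        simp [List.mem_append, not_or, and_comm]
      rw [hf]
      simp

-- ===== VERDICT =====
theorem extract_changed_sections_py_spec : Claim_equal_extract_changed_sections_py := by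
  intro diff_lines _
  unfold Spec_extract_changed_sections_py extract_changed_sections_py extract_changed_sections_py_alt
  rw [foldl_filterMap_addIfAbsent, foldl_addIfAbsent_eq_headPurge]
  simp
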